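-- pv_equiv track=rewrite | github.com/mirqtio/LeadShop | src/assessments/score_calculator.py | _classify_business
-- ===== SOURCE A (Python) =====
-- from typing import Dict, Any, Optional, Tuple, List
--
-- def _classify_business(lead_data: Dict[str, Any]) -> str:
--     """Classify business and return 6-digit NAICS code."""
--
--     # Use existing NAICS code if available
--     naics_code = lead_data.get('naics_code')
--     if naics_code and len(naics_code) == 6:
--         return naics_code
--
--     # Simple classification based on business description
--     description = lead_data.get('description', '').lower()
--     company = lead_data.get('company', '').lower()
--     url = lead_data.get('url', '').lower()
--
--     # Combine all text for analysis
--     business_text = f"{description} {company} {url}"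
--
--     # Classification rules (simplified)
--     if any(term in business_text for term in ['web', 'software', 'app', 'tech', 'development', 'programming']):
--         return '541511'  # Custom Computer Programming Services
--     elif any(term in business_text for term in ['retail', 'store', 'shop', 'ecommerce', 'e-commerce']):
--         return '454110'  # Electronic Shopping and Mail-Order Houses
--     elif any(term in business_text for term in ['restaurant', 'food', 'dining', 'cafe', 'catering']):
--         return '722513'  # Limited-Service Restaurants
--     elif any(term in business_text for term in ['consulting', 'marketing', 'agency', 'service']):
--         return '541990'  # All Other Professional, Scientific Services
--     else:
--         return '541990'  # Default professional services
-- ===== SOURCE B (Python) =====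
-- _CODES = ('541511', '454110', '722513', '541990')
--
-- _KEYWORD_RANK = {
--     'web': 0, 'software': 0, 'app': 0, 'tech': 0, 'development': 0, 'programming': 0,
--     'retail': 1, 'store': 1, 'shop': 1, 'ecommerce': 1, 'e-commerce': 1,
--     'restaurant': 2, 'food': 2, 'dining': 2, 'cafe': 2, 'catering': 2,
--     'consulting': 3, 'marketing': 3, 'agency': 3, 'service': 3,
-- }
--
--
-- def _classify_business(lead_data):
--     """Classify business and return 6-digit NAICS code."""
--
--     # Use existing NAICS code if available
--     naics_code = lead_data.get('naics_code')
--     if naics_code and len(naics_code) == 6: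
--         return naics_code
--
--     description = lead_data.get('description', '').lower()
--     company = lead_data.get('company', '').lower()
--     url = lead_data.get('url', '').lower()
--     business_text = f"{description} {company} {url}"
--
--     # Single pass over a flat keyword->rank index, keeping the best (lowest)
--     # rank of any keyword that occurs; rank 3 is also the no-match default.
--     best = 3
--     for keyword, rank in _KEYWORD_RANK.items():
--         if rank < best and keyword in business_text:
--             best = rank
--     return _CODES[best]
-- ===== Notes on version B (the rewrite author's own statement) =====
-- stated objective: alternative
-- what changed: Replaces the four-branch if/elif first-match chain with a single min-aggregation pass over a flat keyword->rank index (best rank seen wins, rank doubles as the code index), instead of testing keyword groups one branch at a time.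
import Mathlib
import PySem

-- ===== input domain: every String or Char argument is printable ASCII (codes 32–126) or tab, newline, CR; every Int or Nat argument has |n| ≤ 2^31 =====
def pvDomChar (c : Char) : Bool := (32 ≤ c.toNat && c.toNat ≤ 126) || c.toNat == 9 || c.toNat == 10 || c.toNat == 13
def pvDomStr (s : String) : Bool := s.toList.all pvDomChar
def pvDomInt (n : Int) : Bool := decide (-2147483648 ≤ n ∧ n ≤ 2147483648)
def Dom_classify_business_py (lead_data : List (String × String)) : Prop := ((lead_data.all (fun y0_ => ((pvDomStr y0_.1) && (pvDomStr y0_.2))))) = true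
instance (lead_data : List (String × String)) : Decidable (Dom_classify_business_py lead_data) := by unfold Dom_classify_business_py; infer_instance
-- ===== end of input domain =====

-- B replaces A's four-branch first-match if/elif chain with a single min-aggregation pass over a flat keyword->rank index (objective: alternative).


-- ===== PORT A =====
-- truthiness of `naics_code` (None or '' is falsy) combined with len(naics_code) == 6
def pvNaicsGuard (naics : Option String) : Bool :=
  match naics with
  | none => false
  | some n => decide (n.toList ≠ []) && (PySem.Str.len n == 6)

def pvBusinessText (d : PySem.Dict String String) : String :=
  let description := PySem.Str.lower (d.getD "description" "")
  let company := PySem.Str.lower (d.getD "company" "")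
  let url := PySem.Str.lower (d.getD "url" "")
  String.ofList (description.toList ++ [' '] ++ company.toList ++ [' '] ++ url.toList)

def classify_business_py (lead_data : List (String × String)) : String :=
  let d := PySem.Dict.mk lead_data
  let naics := d.get? "naics_code"
  if pvNaicsGuard naics then naics.getD ""
  else
    let business_text := pvBusinessText d
    if (["web", "software", "app", "tech", "development", "programming"].any
        (fun t => PySem.Str.isIn t business_text)) then "541511"
    else if (["retail", "store", "shop", "ecommerce", "e-commerce"].any
        (fun t => PySem.Str.isIn t business_text)) then "454110"
    else if (["restaurant", "food", "dining", "cafe", "catering"].any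
        (fun t => PySem.Str.isIn t business_text)) then "722513"
    else if (["consulting", "marketing", "agency", "service"].any
        (fun t => PySem.Str.isIn t business_text)) then "541990"
    else "541990"

-- ===== PORT B =====
def pvCodes : List String := ["541511", "454110", "722513", "541990"]

-- the flat keyword -> rank index (Python dict literal, insertion order)
def pvKeywordRank : List (String × Nat) :=
  [("web", 0), ("software", 0), ("app", 0), ("tech", 0), ("development", 0), ("programming", 0),
   ("retail", 1), ("store", 1), ("shop", 1), ("ecommerce", 1), ("e-commerce", 1),
   ("restaurant", 2), ("food", 2), ("dining", 2), ("cafe", 2), ("catering", 2),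
   ("consulting", 3), ("marketing", 3), ("agency", 3), ("service", 3)]

def classify_business_py_alt (lead_data : List (String × String)) : String :=
  let d := PySem.Dict.mk lead_data
  let naics := d.get? "naics_code"
  if pvNaicsGuard naics then naics.getD ""
  else
    let business_text := pvBusinessText d
    let best := pvKeywordRank.foldl
      (fun best p => if decide (p.2 < best) && PySem.Str.isIn p.1 business_text then p.2 else best) 3
    pvCodes.getD best "541990"

-- ===== PRECONDITION & SPEC =====
def Spec_classify_business_py (lead_data : List (String × String)) (out : String) : Prop := out = classify_business_py_alt lead_data
instance (lead_data : List (String × String)) (out : String) : Decidable (Spec_classify_business_py lead_data out) := by unfold Spec_classify_business_py; infer_instance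

-- ===== CLAIM (what is proved, stated in full; the proofs are below) =====
def Claim_equal_classify_business_py : Prop := ∀ (lead_data : List (String × String)), Dom_classify_business_py lead_data → Spec_classify_business_py lead_data (classify_business_py lead_data)

-- ===== LEMMAS AND PROOFS =====
-- one constant-rank segment of the index folds to a min with the group's any-match test
theorem pvFold_group (text : String) (ks : List String) (r a : Nat) :
    List.foldl
      (fun best p => if decide (p.2 < best) && PySem.Str.isIn p.1 text then p.2 else best) a
      (ks.map (fun k => (k, r)))
      = if ks.any (fun t => PySem.Str.isIn t text) then min a r else a := by
  induction ks generalizing a with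
  | nil => simp
  | cons k rest ih =>
    simp only [List.map_cons, List.foldl_cons, List.any_cons, ih]
    by_cases hm : PySem.Str.isIn k text = true <;>
      by_cases hr : r < a <;>
      by_cases ha : (rest.any (fun t => PySem.Str.isIn t text)) = true <;>
      simp only [hm, hr, ha, decide_true, decide_false, Bool.and_true, Bool.and_false,
        Bool.or_true, Bool.or_false, if_true, if_false, Nat.min_def, Bool.false_eq_true] <;>
      (try split_ifs) <;> omega

theorem pvKeywordRank_eq :
    pvKeywordRank =
      (["web", "software", "app", "tech", "development", "programming"].map (fun k => (k, 0)))
      ++ (["retail", "store", "shop", "ecommerce", "e-commerce"].map (fun k => (k, 1)))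
      ++ (["restaurant", "food", "dining", "cafe", "catering"].map (fun k => (k, 2)))
      ++ (["consulting", "marketing", "agency", "service"].map (fun k => (k, 3))) := rfl

-- ===== VERDICT (by name: the statement is the Claim_ definition above) =====
theorem classify_business_py_spec : Claim_equal_classify_business_py := by
  intro lead_data _
  unfold Spec_classify_business_py classify_business_py classify_business_py_alt
  by_cases hg : pvNaicsGuard ((PySem.Dict.mk lead_data).get? "naics_code")
  · simp [hg]
  · simp only [hg, if_false, Bool.false_eq_true]
    rw [pvKeywordRank_eq]
    simp only [List.foldl_append, pvFold_group]
    by_cases h0 : (["web", "software", "app", "tech", "development", "programming"].any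
        (fun t => PySem.Str.isIn t (pvBusinessText (PySem.Dict.mk lead_data)))) = true <;>
      by_cases h1 : (["retail", "store", "shop", "ecommerce", "e-commerce"].any
        (fun t => PySem.Str.isIn t (pvBusinessText (PySem.Dict.mk lead_data)))) = true <;>
      by_cases h2 : (["restaurant", "food", "dining", "cafe", "catering"].any
        (fun t => PySem.Str.isIn t (pvBusinessText (PySem.Dict.mk lead_data)))) = true <;>
      by_cases h3 : (["consulting", "marketing", "agency", "service"].any
        (fun t => PySem.Str.isIn t (pvBusinessText (PySem.Dict.mk lead_data)))) = true <;>
      simp only [h0, h1, h2, h3, Bool.false_eq_true, if_true, if_false] <;>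
      rfl
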